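-- pv_equiv track=rewrite | github.com/2025-II-Infra-ADAII/proyecto-i-ada-ii-grupo-l | problema_riego.py | roPD
-- ===== SOURCE A (Python) =====
-- def roPD(finca):
--     # Finca = Secuencia de tablones
--     # Ti = tupla (ts,tr,p)
--     # CRF[i] = p * max(0,(ti^II + tr) - ts)
--     n = len(finca)
--     DP = {}
--     parent = {}
--
--
--     DP[0] = (0, 0)  # caso base
--     parent[0] = -1
--
--     for mask in range(1, 1 << n):
--         DP[mask] = (float("inf"), 0)
--         for i in range(n):
--             if mask & (1 << i):
--                 prev_mask = mask ^ (1 << i)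
--                 if prev_mask not in DP:
--                     continue
--
--                 costo_prev, tiempo_prev = DP[prev_mask]
--                 ts, tr, p = finca[i]
--
--                 t_final = tiempo_prev + tr
--                 retraso = max(0, t_final - ts)
--                 costo_nuevo = costo_prev + p * retraso
--
--                 if costo_nuevo < DP[mask][0]:
--                     DP[mask] = (costo_nuevo, t_final)
--                     parent[mask] = (prev_mask, i)
--
--     mask_completo = (1 << n) - 1
--     costo_minimo, _ = DP[mask_completo]
--
--     permutacion = []
--     mask_actual = mask_completo
--
--     while mask_actual != 0:
--         prev_mask, idx_tablon = parent[mask_actual]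
--         permutacion.append(idx_tablon)
--         mask_actual = prev_mask
--
--     permutacion.reverse()
--     return permutacion, costo_minimo
-- ===== SOURCE B (Python) =====
-- def roPD(finca):
--     # Top-down memoized recursion over bit masks instead of a bottom-up table.
--     n = len(finca)
--     memo = {}
--
--     def f(mask):
--         # returns (min_cost, finish_time, last_job) for scheduling the jobs in mask
--         if mask == 0:
--             return (0, 0, -1)
--         if mask in memo:
--             return memo[mask]
--         best = None
--         for i in range(n):
--             bit = 1 << i
--             if mask & bit:
--                 cost_prev, time_prev, _ = f(mask ^ bit)
--                 ts, tr, p = finca[i]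
--                 t_final = time_prev + tr
--                 cost = cost_prev + p * max(0, t_final - ts)
--                 if best is None or cost < best[0]:
--                     best = (cost, t_final, i)
--         memo[mask] = best
--         return best
--
--     full = (1 << n) - 1
--     cost = f(full)[0]
--     perm = []
--     mask = full
--     while mask:
--         i = f(mask)[2]
--         perm.append(i)
--         mask ^= 1 << i
--     perm.reverse()
--     return perm, cost
-- ===== Notes on version B (the rewrite author's own statement) =====
-- stated objective: alternative
-- what changed: Replaces the bottom-up mask-indexed DP table with explicit parent pointers by a top-down memoized recursion f(mask) -> (cost, finish_time, last_job), reconstructing the permutation by recomputing f along the peeled masks instead of reading a parent dict.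
import Mathlib
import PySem

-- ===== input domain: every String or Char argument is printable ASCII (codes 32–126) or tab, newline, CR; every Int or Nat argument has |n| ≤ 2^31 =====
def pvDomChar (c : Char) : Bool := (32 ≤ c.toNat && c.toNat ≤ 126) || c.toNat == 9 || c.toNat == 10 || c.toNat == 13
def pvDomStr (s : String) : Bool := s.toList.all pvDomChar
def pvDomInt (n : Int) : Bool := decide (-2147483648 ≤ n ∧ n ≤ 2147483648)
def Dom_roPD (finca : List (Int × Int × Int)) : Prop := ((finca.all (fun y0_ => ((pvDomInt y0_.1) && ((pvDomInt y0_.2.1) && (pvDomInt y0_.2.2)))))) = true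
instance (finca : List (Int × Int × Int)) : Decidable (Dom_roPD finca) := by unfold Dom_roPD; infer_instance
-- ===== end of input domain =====

-- B replaces A's bottom-up mask-DP table + parent dict by a top-down memoized
-- recursion f(mask) = (cost, finish_time, last_job), reconstructing the
-- permutation by recomputation; same tie-breaking (ascending index, strict '<').

-- ===== PORT A =====
-- Python floats appear only as the float('inf') sentinel; ported as Option Int
-- (none = inf), with 'roLtInf' the corresponding '<' (every stored cost is an int).
def roLtInf : Option Int → Option Int → Bool
  | some a, some b => a < b
  | some _, none => true
  | none, _ => false

-- one inner-loop iteration 'for i in range(n)' of A (state = (DP, parent));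
-- parent[0] = -1 is a never-read sentinel of a different type and is omitted.
def roPDStep (finca : List (Int × Int × Int)) (mask : Nat)
    (st : PySem.Dict Nat (Option Int × Int) × PySem.Dict Nat (Nat × Nat)) (i : Nat) :
    PySem.Dict Nat (Option Int × Int) × PySem.Dict Nat (Nat × Nat) :=
  if mask &&& (1 <<< i) ≠ 0 then
    match st.1.get? (mask ^^^ (1 <<< i)) with
    | none => st
    | some ct =>
      let f := finca.getD i (0, 0, 0)       -- (ts, tr, p) = finca[i]; i < len(finca) always
      let tf := ct.2 + f.2.1                -- t_final = tiempo_prev + tr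
      let cn := ct.1.map (fun c => c + f.2.2 * max 0 (tf - f.1))   -- costo_nuevo
      if roLtInf cn (st.1.getD mask (none, 0)).1 then
        (st.1.insert mask (cn, tf), st.2.insert mask (mask ^^^ (1 <<< i), i))
      else st
  else st

-- A's reconstruction loop 'while mask_actual != 0'; fuel bounds the iterations
-- (each stored prev_mask is strictly smaller, so fuel = full mask suffices).
def roPDBuild (par : PySem.Dict Nat (Nat × Nat)) : Nat → Nat → List Int
  | _, 0 => []
  | 0, _ => []
  | fuel + 1, m + 1 =>
    match par.get? (m + 1) with
    | some pi => (pi.2 : Int) :: roPDBuild par fuel pi.1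
    | none => []   -- unreachable: parent[mask] is set for every nonzero reachable mask

def roPD (finca : List (Int × Int × Int)) : List Int × Int :=
  let n := finca.length
  let init : PySem.Dict Nat (Option Int × Int) × PySem.Dict Nat (Nat × Nat) :=
    (PySem.Dict.empty.insert 0 (some 0, 0), PySem.Dict.empty)
  let st := (List.range' 1 ((1 <<< n) - 1)).foldl
      (fun st mask =>
        (List.range n).foldl (roPDStep finca mask) (st.1.insert mask (none, 0), st.2))
      init
  let full := (1 <<< n) - 1
  let cmin := (st.1.getD full (none, 0)).1
  ((roPDBuild st.2 full full).reverse, cmin.getD 0)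

-- ===== PORT B =====
-- f(mask) of Source B: (min_cost, finish_time, last_job); recursion made structural by a
-- fuel argument (fuel ≥ mask suffices: each recursive call clears a set bit).
-- Source B's memo dict is pure caching with no observable effect; the port recomputes.
-- Python's (0, 0, -1) base: the -1 last-job sentinel is never read, ported as 0 : Nat.
def roPDF (finca : List (Int × Int × Int)) (n : Nat) : Nat → Nat → Int × Int × Nat
  | _, 0 => (0, 0, 0)
  | 0, _ + 1 => (0, 0, 0)
  | fuel + 1, m + 1 =>
    let best := (List.range n).foldl
      (fun (best : Option (Int × Int × Nat)) i =>
        if (m + 1) &&& (1 <<< i) ≠ 0 then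
          let r := roPDF finca n fuel ((m + 1) ^^^ (1 <<< i))
          let f := finca.getD i (0, 0, 0)   -- (ts, tr, p) = finca[i]
          let tf := r.2.1 + f.2.1
          let cost := r.1 + f.2.2 * max 0 (tf - f.1)
          match best with
          | none => some (cost, tf, i)
          | some b => if cost < b.1 then some (cost, tf, i) else best
        else best) none
    best.getD (0, 0, 0)

-- Source B's 'while mask' peeling loop, with the same fuel bound.
def roPDRebuild (finca : List (Int × Int × Int)) (n : Nat) : Nat → Nat → List Int
  | _, 0 => []
  | 0, _ => []
  | fuel + 1, m + 1 =>
    let i := (roPDF finca n (m + 1) (m + 1)).2.2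
    (i : Int) :: roPDRebuild finca n fuel ((m + 1) ^^^ (1 <<< i))

def roPD_alt (finca : List (Int × Int × Int)) : List Int × Int :=
  let n := finca.length
  let full := (1 <<< n) - 1
  let cost := (roPDF finca n full full).1
  ((roPDRebuild finca n full full).reverse, cost)

-- ===== PRECONDITION & SPEC =====
def Spec_roPD (finca : List (Int × Int × Int)) (out : List Int × Int) : Prop := out = roPD_alt finca
instance (finca : List (Int × Int × Int)) (out : List Int × Int) : Decidable (Spec_roPD finca out) := by unfold Spec_roPD; infer_instance

-- ===== CLAIM (what is proved, stated in full; the proofs are below) =====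
def Claim_equal_roPD : Prop := ∀ (finca : List (Int × Int × Int)), Dom_roPD finca → Spec_roPD finca (roPD finca)

-- ===== LEMMAS AND PROOFS =====

theorem ro_xor_lt {mask i : Nat} (h : mask &&& (1 <<< i) ≠ 0) : mask ^^^ (1 <<< i) < mask := by
  rw [Nat.one_shiftLeft] at h ⊢
  have hb : mask.testBit i = true := by
    rcases htb : mask.testBit i
    · rw [Nat.and_two_pow, htb] at h; simp at h
    · rfl
  apply Nat.lt_of_testBit i
  · simp [Nat.testBit_xor, hb]
  · exact hb
  · intro j hj
    simp [Nat.testBit_xor, Nat.ne_of_lt hj]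

-- f(mask) with its natural fuel
def roF (finca : List (Int × Int × Int)) (n mask : Nat) : Int × Int × Nat :=
  roPDF finca n mask mask

-- the inner-minimisation step, with recursive values replaced by roF
def roBestStep (finca : List (Int × Int × Int)) (n mask : Nat)
    (best : Option (Int × Int × Nat)) (i : Nat) : Option (Int × Int × Nat) :=
  if mask &&& (1 <<< i) ≠ 0 then
    let r := roF finca n (mask ^^^ (1 <<< i))
    let f := finca.getD i (0, 0, 0)
    let tf := r.2.1 + f.2.1
    let cost := r.1 + f.2.2 * max 0 (tf - f.1)
    match best with
    | none => some (cost, tf, i)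
    | some b => if cost < b.1 then some (cost, tf, i) else best
  else best

theorem roPDF_eq (finca : List (Int × Int × Int)) (n : Nat) :
    ∀ mask fuel, mask ≤ fuel →
    roPDF finca n fuel mask =
      if mask = 0 then (0, 0, 0)
      else ((List.range n).foldl (roBestStep finca n mask) none).getD (0, 0, 0) := by
  intro mask
  induction mask using Nat.strong_induction_on with
  | _ mask ih =>
    rcases mask with _ | m
    · intro fuel _; cases fuel <;> simp [roPDF]
    · intro fuel hle
      rcases fuel with _ | f
      · omega
      · simp only [roPDF, if_neg (Nat.succ_ne_zero m)]
        congr 1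
        apply PySem.List.foldl_congr_mem
        intro b i _
        by_cases hbit : (m + 1) &&& (1 <<< i) ≠ 0
        · have hlt := ro_xor_lt hbit
          have h1 := ih _ hlt f (by omega)
          have h2 := ih _ hlt ((m + 1) ^^^ (1 <<< i)) le_rfl
          simp only [roBestStep, roF, if_pos hbit, h1, h2]
        · simp only [roBestStep, if_neg hbit]

theorem roF_of_fold (finca : List (Int × Int × Int)) (n mask : Nat) (h0 : mask ≠ 0)
    {x : Int × Int × Nat}
    (hx : (List.range n).foldl (roBestStep finca n mask) none = some x) :
    roF finca n mask = x := by
  rw [roF, roPDF_eq finca n mask mask le_rfl, if_neg h0, hx]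
  rfl

def roDpVal (finca : List (Int × Int × Int)) (n m : Nat) : Option Int × Int :=
  (some (roF finca n m).1, (roF finca n m).2.1)

def roLast (finca : List (Int × Int × Int)) (n m : Nat) : Nat := (roF finca n m).2.2

def roEnc : Option (Int × Int × Nat) → Option Int × Int
  | none => (none, 0)
  | some x => (some x.1, x.2.1)

def roTf (finca : List (Int × Int × Int)) (n mask i : Nat) : Int :=
  (roF finca n (mask ^^^ (1 <<< i))).2.1 + (finca.getD i (0, 0, 0)).2.1

def roCost (finca : List (Int × Int × Int)) (n mask i : Nat) : Int :=
  (roF finca n (mask ^^^ (1 <<< i))).1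
    + (finca.getD i (0, 0, 0)).2.2 * max 0 (roTf finca n mask i - (finca.getD i (0, 0, 0)).1)

def roParOK (par : PySem.Dict Nat (Nat × Nat)) (mask : Nat) (b : Option (Int × Int × Nat)) : Prop :=
  ∀ c t i, b = some (c, t, i) → par.get? mask = some (mask ^^^ (1 <<< i), i)

theorem roBestStep_isSome (finca : List (Int × Int × Int)) (n mask : Nat)
    (b : Option (Int × Int × Nat)) (i : Nat)
    (h : b.isSome ∨ mask &&& (1 <<< i) ≠ 0) : (roBestStep finca n mask b i).isSome := by
  unfold roBestStep
  rcases b with _ | x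
  · rcases h with h | h
    · simp at h
    · simp [h]
  · by_cases hbit : mask &&& (1 <<< i) ≠ 0
    · simp only [if_pos hbit]
      split <;> simp
    · simp [hbit]

theorem roBest_isSome_mono (finca : List (Int × Int × Int)) (n mask : Nat) :
    ∀ (l : List Nat) (b : Option (Int × Int × Nat)), b.isSome →
    (l.foldl (roBestStep finca n mask) b).isSome := by
  intro l
  induction l with
  | nil => intro b h; exact h
  | cons i l ihl =>
    intro b h
    simp only [List.foldl_cons]
    exact ihl _ (roBestStep_isSome finca n mask b i (Or.inl h))

theorem roBest_some_of_mem (finca : List (Int × Int × Int)) (n mask : Nat) :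
    ∀ (l : List Nat) (b : Option (Int × Int × Nat)) (i : Nat), i ∈ l →
    mask &&& (1 <<< i) ≠ 0 → (l.foldl (roBestStep finca n mask) b).isSome := by
  intro l
  induction l with
  | nil => intro b i h; simp at h
  | cons j l ihl =>
    intro b i hmem hbit
    simp only [List.foldl_cons]
    rcases List.mem_cons.mp hmem with rfl | hmem
    · exact roBest_isSome_mono finca n mask l _ (roBestStep_isSome finca n mask b i (Or.inr hbit))
    · exact ihl _ _ hmem hbit

theorem roBest_bit_set (finca : List (Int × Int × Int)) (n mask : Nat) :
    ∀ (l : List Nat) (b : Option (Int × Int × Nat)),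
    (∀ c t i, b = some (c, t, i) → mask &&& (1 <<< i) ≠ 0) →
    ∀ c t i, l.foldl (roBestStep finca n mask) b = some (c, t, i) →
    mask &&& (1 <<< i) ≠ 0 := by
  intro l
  induction l with
  | nil => intro b hb c t i h; exact hb c t i h
  | cons j l ihl =>
    intro b hb c t i h
    simp only [List.foldl_cons] at h
    refine ihl _ ?_ c t i h
    intro c' t' i' h'
    unfold roBestStep at h'
    by_cases hbit : mask &&& (1 <<< j) ≠ 0
    · rw [if_pos hbit] at h'
      rcases b with _ | x
      · simp only [Option.some.injEq, Prod.mk.injEq] at h'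
        obtain ⟨-, -, rfl⟩ := h'
        exact hbit
      · simp only at h'
        split at h'
        · simp only [Option.some.injEq, Prod.mk.injEq] at h'
          obtain ⟨-, -, rfl⟩ := h'
          exact hbit
        · exact hb c' t' i' h'
    · rw [if_neg hbit] at h'
      exact hb c' t' i' h'

-- the inner loop of A computes exactly the fold of roBestStep, recorded in DP/parent
theorem ro_innerA (finca : List (Int × Int × Int)) (n mask : Nat) :
    ∀ (l : List Nat) (dp : PySem.Dict Nat (Option Int × Int)) (par : PySem.Dict Nat (Nat × Nat))
      (b : Option (Int × Int × Nat)),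
    (∀ i ∈ l, mask &&& (1 <<< i) ≠ 0 →
        dp.get? (mask ^^^ (1 <<< i)) = some (roDpVal finca n (mask ^^^ (1 <<< i)))) →
    dp.get? mask = some (roEnc b) →
    roParOK par mask b →
    (∀ q, q ≠ mask → (l.foldl (roPDStep finca mask) (dp, par)).1.get? q = dp.get? q) ∧
    (l.foldl (roPDStep finca mask) (dp, par)).1.get? mask
        = some (roEnc (l.foldl (roBestStep finca n mask) b)) ∧
    (∀ q, q ≠ mask → (l.foldl (roPDStep finca mask) (dp, par)).2.get? q = par.get? q) ∧
    roParOK (l.foldl (roPDStep finca mask) (dp, par)).2 mask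
        (l.foldl (roBestStep finca n mask) b) := by
  intro l
  induction l with
  | nil =>
    intro dp par b _ h2 h3
    exact ⟨fun q _ => rfl, h2, fun q _ => rfl, h3⟩
  | cons i l ihl =>
    intro dp par b h1 h2 h3
    simp only [List.foldl_cons]
    by_cases hbit : mask &&& (1 <<< i) ≠ 0
    · have hprev := h1 i List.mem_cons_self hbit
      have hne : mask ^^^ (1 <<< i) ≠ mask := Nat.ne_of_lt (ro_xor_lt hbit)
      have hgetD : dp.getD mask (none, 0) = roEnc b :=
        PySem.Dict.getD_of_get?_eq_some _ _ h2
      have hupd :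
          (∀ q, q ≠ mask →
            (l.foldl (roPDStep finca mask)
              (dp.insert mask (some (roCost finca n mask i), roTf finca n mask i),
               par.insert mask (mask ^^^ (1 <<< i), i))).1.get? q = dp.get? q) ∧
          (l.foldl (roPDStep finca mask)
              (dp.insert mask (some (roCost finca n mask i), roTf finca n mask i),
               par.insert mask (mask ^^^ (1 <<< i), i))).1.get? mask
            = some (roEnc (l.foldl (roBestStep finca n mask)
                (some (roCost finca n mask i, roTf finca n mask i, i)))) ∧
          (∀ q, q ≠ mask →
            (l.foldl (roPDStep finca mask)
              (dp.insert mask (some (roCost finca n mask i), roTf finca n mask i),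
               par.insert mask (mask ^^^ (1 <<< i), i))).2.get? q = par.get? q) ∧
          roParOK (l.foldl (roPDStep finca mask)
              (dp.insert mask (some (roCost finca n mask i), roTf finca n mask i),
               par.insert mask (mask ^^^ (1 <<< i), i))).2 mask
            (l.foldl (roBestStep finca n mask)
              (some (roCost finca n mask i, roTf finca n mask i, i))) := by
        have h1' : ∀ j ∈ l, mask &&& (1 <<< j) ≠ 0 →
            (dp.insert mask (some (roCost finca n mask i), roTf finca n mask i)).get?
                (mask ^^^ (1 <<< j)) = some (roDpVal finca n (mask ^^^ (1 <<< j))) := by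
          intro j hj hbj
          rw [PySem.Dict.get?_insert_of_ne _ _ (Nat.ne_of_lt (ro_xor_lt hbj))]
          exact h1 j (List.mem_cons_of_mem i hj) hbj
        have h2' : (dp.insert mask (some (roCost finca n mask i), roTf finca n mask i)).get? mask
            = some (roEnc (some (roCost finca n mask i, roTf finca n mask i, i))) := by
          rw [PySem.Dict.get?_insert_self]; rfl
        have h3' : roParOK (par.insert mask (mask ^^^ (1 <<< i), i)) mask
            (some (roCost finca n mask i, roTf finca n mask i, i)) := by
          intro c' t' i' h'
          simp only [Option.some.injEq, Prod.mk.injEq] at h'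
          obtain ⟨-, -, rfl⟩ := h'
          rw [PySem.Dict.get?_insert_self]
        obtain ⟨g1, g2, g3, g4⟩ := ihl _ _ _ h1' h2' h3'
        refine ⟨?_, g2, ?_, g4⟩
        · intro q hq
          rw [g1 q hq, PySem.Dict.get?_insert_of_ne _ _ hq]
        · intro q hq
          rw [g3 q hq, PySem.Dict.get?_insert_of_ne _ _ hq]
      rcases b with _ | x
      · have hstep : roPDStep finca mask (dp, par) i =
            (dp.insert mask (some (roCost finca n mask i), roTf finca n mask i),
             par.insert mask (mask ^^^ (1 <<< i), i)) := by
          simp [roPDStep, hbit, hprev, hgetD, roDpVal, roEnc, roLtInf, roCost, roTf]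
        have hbest : roBestStep finca n mask none i
            = some (roCost finca n mask i, roTf finca n mask i, i) := by
          simp [roBestStep, hbit, roCost, roTf]
        rw [hstep, hbest]
        exact hupd
      · have hstep : roPDStep finca mask (dp, par) i =
            (if roCost finca n mask i < x.1 then
              (dp.insert mask (some (roCost finca n mask i), roTf finca n mask i),
               par.insert mask (mask ^^^ (1 <<< i), i))
            else (dp, par)) := by
          simp [roPDStep, hbit, hprev, hgetD, roDpVal, roEnc, roLtInf, roCost, roTf]
        have hbest : roBestStep finca n mask (some x) i =
            (if roCost finca n mask i < x.1 then
              some (roCost finca n mask i, roTf finca n mask i, i)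
            else some x) := by
          simp [roBestStep, hbit, roCost, roTf]
        by_cases hc : roCost finca n mask i < x.1
        · rw [hstep, hbest, if_pos hc, if_pos hc]
          exact hupd
        · rw [hstep, hbest, if_neg hc, if_neg hc]
          exact ihl dp par (some x) (fun j hj hbj => h1 j (List.mem_cons_of_mem i hj) hbj) h2 h3
    · have hstep : roPDStep finca mask (dp, par) i = (dp, par) := by
        simp [roPDStep, hbit]
      have hbest : roBestStep finca n mask b i = b := by
        simp [roBestStep, hbit]
      rw [hstep, hbest]
      exact ihl dp par b (fun j hj hbj => h1 j (List.mem_cons_of_mem i hj) hbj) h2 h3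

theorem ro_exists_bit {n mask : Nat} (h0 : mask ≠ 0) (h2 : mask < 2 ^ n) :
    ∃ i, i ∈ List.range n ∧ mask &&& (1 <<< i) ≠ 0 := by
  obtain ⟨i, hi⟩ : ∃ i, mask.testBit i = true := by
    by_contra h
    push_neg at h
    exact h0 (Nat.eq_of_testBit_eq (fun j => by
      simp [Bool.not_eq_true] at h
      simp [h j]))
  have hin : i < n := by
    by_contra hge
    push_neg at hge
    have : mask.testBit i = false :=
      Nat.testBit_lt_two_pow (lt_of_lt_of_le h2 (Nat.pow_le_pow_right (by omega) hge))
    simp [hi] at this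
  refine ⟨i, List.mem_range.mpr hin, ?_⟩
  rw [Nat.one_shiftLeft, Nat.and_two_pow, hi]
  have := Nat.two_pow_pos i
  simp

theorem roLast_bit (finca : List (Int × Int × Int)) (n mask : Nat)
    (h0 : mask ≠ 0) (h2 : mask < 2 ^ n) :
    mask &&& (1 <<< roLast finca n mask) ≠ 0 := by
  obtain ⟨i, hmem, hbit⟩ := ro_exists_bit h0 h2
  have hsome := roBest_some_of_mem finca n mask (List.range n) none i hmem hbit
  obtain ⟨x, hx⟩ := Option.isSome_iff_exists.mp hsome
  have hF := roF_of_fold finca n mask h0 hx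
  have hb := roBest_bit_set finca n mask (List.range n) none (by intro c t j h; cases h)
      x.1 x.2.1 x.2.2 (by rw [hx])
  rw [roLast, hF]
  exact hb

def roOuter (finca : List (Int × Int × Int)) (n k : Nat) :
    PySem.Dict Nat (Option Int × Int) × PySem.Dict Nat (Nat × Nat) :=
  (List.range' 1 k).foldl
    (fun st mask =>
      (List.range n).foldl (roPDStep finca mask) (st.1.insert mask (none, 0), st.2))
    (PySem.Dict.empty.insert 0 (some 0, 0), PySem.Dict.empty)

theorem ro_outer (finca : List (Int × Int × Int)) (n : Nat) :
    ∀ k, k ≤ 2 ^ n - 1 →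
    (∀ m, m ≤ k → (roOuter finca n k).1.get? m = some (roDpVal finca n m)) ∧
    (∀ m, 1 ≤ m → m ≤ k →
      (roOuter finca n k).2.get? m
        = some (m ^^^ (1 <<< roLast finca n m), roLast finca n m)) := by
  intro k
  induction k with
  | zero =>
    intro _
    constructor
    · intro m hm
      interval_cases m
      rw [roOuter]
      simp [PySem.Dict.get?_insert_self, roDpVal, roF, roPDF]
    · intro m hm1 hm2; omega
  | succ k ihk =>
    intro hk
    obtain ⟨hdp, hpar⟩ := ihk (by omega)
    have hone : 1 ≤ 2 ^ n := Nat.one_le_two_pow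
    have hklt : k + 1 < 2 ^ n := by omega
    have hrange : List.range' 1 (k + 1) = List.range' 1 k ++ [k + 1] := by
      rw [List.range'_concat]; simp [Nat.add_comm]
    have hfold : roOuter finca n (k + 1)
        = (List.range n).foldl (roPDStep finca (k + 1))
            (((roOuter finca n k).1.insert (k + 1) (none, 0)), (roOuter finca n k).2) := by
      rw [roOuter, roOuter, hrange, List.foldl_append]
      rfl
    obtain ⟨g1, g2, g3, g4⟩ := ro_innerA finca n (k + 1) (List.range n)
        ((roOuter finca n k).1.insert (k + 1) (none, 0)) (roOuter finca n k).2 none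
        (by
          intro i hi hbit
          rw [PySem.Dict.get?_insert_of_ne _ _ (Nat.ne_of_lt (ro_xor_lt hbit))]
          exact hdp _ (by have := ro_xor_lt hbit; omega))
        (by rw [PySem.Dict.get?_insert_self]; rfl)
        (by intro c t i h; cases h)
    obtain ⟨i0, hmem, hbit0⟩ := ro_exists_bit (n := n) (mask := k + 1) (by omega) hklt
    obtain ⟨x, hx⟩ := Option.isSome_iff_exists.mp
      (roBest_some_of_mem finca n (k + 1) (List.range n) none i0 hmem hbit0)
    have hF := roF_of_fold finca n (k + 1) (by omega) hx
    constructor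
    · intro m hm
      rcases Nat.lt_or_ge m (k + 1) with hlt | hge
      · rw [hfold, g1 m (by omega), PySem.Dict.get?_insert_of_ne _ _ (by omega)]
        exact hdp m (by omega)
      · have hmeq : m = k + 1 := by omega
        subst hmeq
        rw [hfold, g2, hx]
        rw [roDpVal, hF]
        rfl
    · intro m hm1 hm2
      rcases Nat.lt_or_ge m (k + 1) with hlt | hge
      · rw [hfold, g3 m (by omega)]
        exact hpar m hm1 (by omega)
      · have hmeq : m = k + 1 := by omega
        subst hmeq
        rw [hfold]
        have := g4 x.1 x.2.1 x.2.2 (by rw [hx])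
        rw [this, roLast, hF]

theorem ro_build_eq (finca : List (Int × Int × Int)) (n : Nat)
    (par : PySem.Dict Nat (Nat × Nat))
    (hpar : ∀ m, 1 ≤ m → m ≤ 2 ^ n - 1 →
      par.get? m = some (m ^^^ (1 <<< roLast finca n m), roLast finca n m)) :
    ∀ fuel mask, mask ≤ fuel → mask ≤ 2 ^ n - 1 →
    roPDBuild par fuel mask = roPDRebuild finca n fuel mask := by
  intro fuel
  induction fuel with
  | zero =>
    intro mask h1 _
    have : mask = 0 := by omega
    subst this
    simp [roPDBuild, roPDRebuild]
  | succ f ihf =>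
    intro mask h1 h2
    rcases mask with _ | m
    · simp [roPDBuild, roPDRebuild]
    · have hone : 1 ≤ 2 ^ n := Nat.one_le_two_pow
      have hbit := roLast_bit finca n (m + 1) (by omega) (by omega)
      have hlt := ro_xor_lt hbit
      have hget := hpar (m + 1) (by omega) h2
      simp only [roPDBuild, roPDRebuild, hget]
      have hlast : (roPDF finca n (m + 1) (m + 1)).2.2 = roLast finca n (m + 1) := rfl
      rw [hlast]
      congr 1
      exact ihf ((m + 1) ^^^ (1 <<< roLast finca n (m + 1))) (by omega) (by omega)

-- ===== VERDICT (by name: the statement is the Claim_ definition above) =====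
theorem roPD_spec : Claim_equal_roPD := by
  intro finca _
  unfold Spec_roPD
  obtain ⟨hdp, hpar⟩ := ro_outer finca finca.length (2 ^ finca.length - 1) le_rfl
  have hcost : ((roOuter finca finca.length (2 ^ finca.length - 1)).1.getD
      (2 ^ finca.length - 1) (none, 0)).1.getD 0
      = (roF finca finca.length (2 ^ finca.length - 1)).1 := by
    rw [PySem.Dict.getD_of_get?_eq_some _ _ (hdp _ le_rfl)]
    rfl
  have hperm := ro_build_eq finca finca.length
      (roOuter finca finca.length (2 ^ finca.length - 1)).2 hpar
      (2 ^ finca.length - 1) (2 ^ finca.length - 1) le_rfl le_rfl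
  show roPD finca = roPD_alt finca
  rw [roPD, roPD_alt]
  simp only [Nat.one_shiftLeft]
  rw [show ((List.range' 1 (2 ^ finca.length - 1)).foldl
      (fun st mask =>
        (List.range finca.length).foldl (roPDStep finca mask) (st.1.insert mask (none, 0), st.2))
      (PySem.Dict.empty.insert 0 (some 0, 0), PySem.Dict.empty))
      = roOuter finca finca.length (2 ^ finca.length - 1) from rfl]
  rw [hperm, hcost]
  rfl
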